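-- pv_equiv track=rewrite | github.com/ejdam87/leetcode-hub | medium/greetings.py | n_greetings
-- ===== SOURCE A (Python) =====
-- def n_greetings(people: list[tuple[int, int]]) -> int:
--
--     # when will person i reach its target
--     target_times = []
--     for a, b in people:
--         target_times.append( b - a )
--
--     n_greets = 0
--     # when will other reach it
--     for i in range(len(people)):
--         for j in range( len(people) ):
--             if i == j:
--                 continue
--
--             ai, bi = people[i]
--             aj, bj = people[j]
--
--             # will i get to the j target ?
--             if bi < bj:
--                 continue
--
--             # when will i get to the j ?
--             reaching_j = bj - ai
--
--             # if I reach j's target after j, we will greet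
--             if reaching_j > target_times[j]:
--                 n_greets += 1
--
--     return n_greets
-- ===== SOURCE B (Python) =====
-- def n_greetings(people: list[tuple[int, int]]) -> int:
--     # Person i greets person j  iff  a_i < a_j and b_i >= b_j  (algebraic
--     # simplification of A's reaching-time comparison).  Sort by start a and
--     # sweep: 'flushed' holds the b-values of everyone whose a is strictly
--     # smaller than the current run's a, so each person only scans those.
--     s = sorted(people, key=lambda p: p[0])
--     total = 0
--     flushed = []   # b-values of people with a strictly below the current a
--     pending = []   # b-values of the current equal-a run
--     prev_a = None
--     for a, b in s:
--         if prev_a is None or a != prev_a: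
--             flushed = flushed + pending
--             pending = []
--             prev_a = a
--         total += sum(1 for x in flushed if x >= b)
--         pending.append(b)
--     return total
-- ===== Notes on version B (the rewrite author's own statement) =====
-- stated objective: faster
-- what changed: B simplifies A's reaching-time test algebraically to 'a_i < a_j and b_i >= b_j' and replaces the all-ordered-index-pairs double loop (with the precomputed target_times table) by a sort-by-a sweep that, for each person, counts qualifying b-values among only the people with strictly smaller a.
import Mathlib
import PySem

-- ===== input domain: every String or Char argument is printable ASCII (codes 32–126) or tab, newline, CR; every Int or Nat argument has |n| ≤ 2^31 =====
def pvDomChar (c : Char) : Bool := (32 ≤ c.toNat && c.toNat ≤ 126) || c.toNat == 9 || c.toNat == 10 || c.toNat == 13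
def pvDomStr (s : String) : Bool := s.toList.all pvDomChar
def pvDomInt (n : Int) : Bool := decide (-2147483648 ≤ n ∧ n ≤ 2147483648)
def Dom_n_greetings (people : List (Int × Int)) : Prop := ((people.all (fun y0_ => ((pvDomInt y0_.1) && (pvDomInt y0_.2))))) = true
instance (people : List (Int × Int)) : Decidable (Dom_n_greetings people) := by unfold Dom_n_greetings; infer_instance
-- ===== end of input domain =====

-- B replaces A's all-ordered-pairs index double loop by a sort-by-a sweep that
-- counts, per person, the qualifying b-values among strictly-smaller-a people
-- (objective: faster by a constant factor; the greeting test simplifies to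
-- a_i < a_j ∧ b_i ≥ b_j).

-- ===== PORT A =====
def n_greetings (people : List (Int × Int)) : Int :=
  -- target_times.append(b - a)
  let target_times := people.foldl (fun acc p => acc ++ [p.2 - p.1]) ([] : List Int)
  -- nested 'for i in range(len(people)) / for j in range(len(people))'
  (PySem.List.pyRange 0 (PySem.List.len people) 1).foldl (fun acc i =>
    (PySem.List.pyRange 0 (PySem.List.len people) 1).foldl (fun acc j =>
      if i = j then acc
      else
        let pi_ := PySem.List.pyGetD people i (0, 0)   -- ai, bi = people[i]
        let pj_ := PySem.List.pyGetD people j (0, 0)   -- aj, bj = people[j]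
        if pi_.2 < pj_.2 then acc
        else
          let reaching_j := pj_.2 - pi_.1
          if reaching_j > PySem.List.pyGetD target_times j 0 then acc + 1 else acc)
      acc)
    0

-- ===== PORT B =====
-- one loop iteration of B's sweep (state: total, flushed, pending, prev_a)
def pvAltStep (st : Int × List Int × List Int × Option Int) (p : Int × Int) :
    Int × List Int × List Int × Option Int :=
  match st, p with
  | (total, flushed, pending, prevA), (a, b) =>
    -- if prev_a is None or a != prev_a: flushed = flushed + pending; pending = []; prev_a = a
    let st1 := if prevA = some a then (total, flushed, pending, prevA)
               else (total, flushed ++ pending, ([] : List Int), some a)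
    match st1 with
    | (total, flushed, pending, prevA) =>
      -- total += sum(1 for x in flushed if x >= b); pending.append(b)
      (total + (flushed.countP (fun x => b ≤ x) : Int), flushed, pending ++ [b], prevA)

def n_greetings_alt (people : List (Int × Int)) : Int :=
  let s := PySem.List.sorted people (fun p => p.1) false
  (s.foldl pvAltStep (0, [], [], none)).1

-- ===== PRECONDITION & SPEC =====
def Spec_n_greetings (people : List (Int × Int)) (out : Int) : Prop := out = n_greetings_alt people
instance (people : List (Int × Int)) (out : Int) : Decidable (Spec_n_greetings people out) := by unfold Spec_n_greetings; infer_instance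

-- ===== CLAIM (what is proved, stated in full; the proofs are below) =====
def Claim_equal_n_greetings : Prop := ∀ (people : List (Int × Int)), Dom_n_greetings people → Spec_n_greetings people (n_greetings people)

-- ===== LEMMAS AND PROOFS =====

-- the greeting condition: person p greets person q
def pvCnd (p q : Int × Int) : Bool := decide (q.2 ≤ p.2) && decide (p.1 < q.1)

-- A computes, for each person p, how many q it greets
theorem a_eq_rowsum (people : List (Int × Int)) :
    n_greetings people
      = (people.map (fun p => (people.countP (pvCnd p) : Int))).sum := by
  have hlen : PySem.List.len people = (people.length : Int) := PySem.List.len_eq people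
  simp only [n_greetings, PySem.List.foldl_append_singleton_eq_map, List.nil_append]
  rw [PySem.List.foldl_congr_mem _ _
      (g := fun acc i => acc + (people.countP (pvCnd (PySem.List.pyGetD people i (0, 0))) : Int))
      _ ?_]
  · rw [PySem.List.foldl_pyRange_zero_pyGetD people (0, 0)
        (f := fun acc p => acc + (people.countP (pvCnd p) : Int)),
      PySem.List.foldl_add]
    simp
  · -- outer body ↦ count
    intro acc i hi
    rw [PySem.List.mem_pyRange_one, hlen] at hi
    rw [PySem.List.foldl_congr_mem _ _
        (g := fun acc j => if pvCnd (PySem.List.pyGetD people i (0, 0)) (PySem.List.pyGetD people j (0, 0)) then acc + 1 else acc)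
        _ ?_]
    · rw [PySem.List.foldl_pyRange_zero_pyGetD people (0, 0)
          (f := fun acc q => if pvCnd (PySem.List.pyGetD people i (0, 0)) q then acc + 1 else acc),
        PySem.List.foldl_if_add_one]
    · -- inner body, pointwise on j ∈ range
      intro acc j hj
      rw [PySem.List.mem_pyRange_one, hlen] at hj
      by_cases hij : i = j
      · subst hij
        simp [pvCnd]
      · simp only [if_neg hij]
        have hjlen : j < ((people.map (fun p => p.2 - p.1)).length : Int) := by
          simpa using hj.2
        rw [PySem.List.pyGetD_eq_getElem _ 0 hj.1 hjlen,
            PySem.List.pyGetD_eq_getElem people (0, 0) hj.1 hj.2,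
            List.getElem_map]
        simp only [pvCnd]
        set p := PySem.List.pyGetD people i (0, 0)
        set q := people[j.toNat]
        by_cases h1 : p.2 < q.2
        · rw [if_pos h1]
          have : ¬(decide (q.2 ≤ p.2) && decide (p.1 < q.1)) = true := by
            simp; intro h; omega
          rw [if_neg this]
        · rw [if_neg h1]
          by_cases h2 : q.2 - q.1 < q.2 - p.1
          · rw [if_pos h2, if_pos (by simp; omega)]
          · rw [if_neg h2, if_neg (by simp; omega)]

-- double-counting swap
theorem sum_swap (l l' : List (Int × Int)) :
    (l.map (fun p => (l'.countP (pvCnd p) : Int))).sum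
      = (l'.map (fun q => (l.countP (fun p => pvCnd p q) : Int))).sum := by
  induction l with
  | nil => simp
  | cons p l ih =>
    simp only [List.map_cons, List.sum_cons, ih, List.countP_cons, Nat.cast_add, Nat.cast_ite,
      Nat.cast_one, Nat.cast_zero]
    rw [PySem.List.sum_map_add_int, PySem.List.sum_map_ite_one_zero]
    ring

-- both the inner count and the outer sum are invariant under permutation
theorem colsum_perm (l s : List (Int × Int)) (h : s.Perm l) :
    (l.map (fun q => (l.countP (fun p => pvCnd p q) : Int))).sum
      = (s.map (fun q => (s.countP (fun p => pvCnd p q) : Int))).sum := by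
  have hf : (fun q => ((l.countP (fun p => pvCnd p q) : Nat) : Int))
      = fun q => ((s.countP (fun p => pvCnd p q) : Nat) : Int) := by
    funext q; rw [h.countP_eq]
  rw [hf]
  exact ((h.map _).sum_eq).symm

theorem countP_cnd_of_lt (L : List (Int × Int)) (a b : Int) (h : ∀ p ∈ L, p.1 < a) :
    L.countP (fun p => pvCnd p (a, b)) = L.countP (fun p => decide (b ≤ p.2)) := by
  apply List.countP_congr
  intro p hp
  simp [pvCnd, h p hp]

theorem countP_cnd_zero (L : List (Int × Int)) (a b : Int) (h : ∀ p ∈ L, a ≤ p.1) :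
    L.countP (fun p => pvCnd p (a, b)) = 0 := by
  rw [List.countP_eq_zero]
  intro p hp
  simp [pvCnd]
  intro _
  exact h p hp

-- B's sweep loop invariant
theorem loop_run (rest : List (Int × Int)) :
    ∀ (t : Int) (F P : List (Int × Int)) (pa : Int),
    (∀ p ∈ F, p.1 < pa) → (∀ p ∈ P, p.1 = pa) → (∀ q ∈ rest, pa ≤ q.1) →
    rest.Pairwise (fun p q => p.1 ≤ q.1) →
    (rest.foldl pvAltStep (t, F.map (·.2), P.map (·.2), some pa)).1
      = t + (rest.map (fun q => ((F ++ P ++ rest).countP (fun p => pvCnd p q) : Int))).sum := by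
  induction rest with
  | nil => intro t F P pa _ _ _ _; simp
  | cons q rest ih =>
    intro t F P pa hF hP hrest hpw
    obtain ⟨a, b⟩ := q
    have hpa : pa ≤ a := hrest (a, b) (List.mem_cons_self)
    rw [List.pairwise_cons] at hpw
    have hrest' : ∀ q' ∈ rest, a ≤ q'.1 := fun q' hq' => hpw.1 q' hq'
    by_cases he : pa = a
    · -- same run: no flush
      subst he
      have hstep : pvAltStep (t, F.map (·.2), P.map (·.2), some pa) (pa, b)
          = (t + ((F.map (·.2)).countP (fun x => b ≤ x) : Int), F.map (·.2),
             (P ++ [(pa, b)]).map (·.2), some pa) := by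
        simp [pvAltStep]
      rw [List.foldl_cons, hstep,
          ih (t + ((F.map (·.2)).countP (fun x => b ≤ x) : Int)) F (P ++ [(pa, b)]) pa hF
            (by intro p hp; rcases List.mem_append.1 hp with h | h
                · exact hP p h
                · simp at h; subst h; rfl)
            hrest' hpw.2]
      have hlist : F ++ (P ++ [(pa, b)]) ++ rest = F ++ P ++ ((pa, b) :: rest) := by
        simp
      rw [hlist]
      have hcount : ((F ++ P ++ ((pa, b) :: rest)).countP (fun p => pvCnd p (pa, b)) : Int)
          = ((F.map (·.2)).countP (fun x => b ≤ x) : Int) := by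
        rw [List.countP_append, List.countP_append,
            countP_cnd_of_lt F pa b hF,
            countP_cnd_zero P pa b (fun p hp => le_of_eq (hP p hp).symm),
            countP_cnd_zero ((pa, b) :: rest) pa b (by
              intro p hp
              rcases List.mem_cons.1 hp with h | h
              · subst h; rfl
              · exact le_trans hpa (hrest' p h)),
            List.countP_map]
        rfl
      simp only [List.map_cons, List.sum_cons, hcount]
      ring
    · -- new run: flush
      have hlt : pa < a := lt_of_le_of_ne hpa he
      have hstep : pvAltStep (t, F.map (·.2), P.map (·.2), some pa) (a, b)
          = (t + (((F ++ P).map (·.2)).countP (fun x => b ≤ x) : Int), (F ++ P).map (·.2),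
             ([(a, b)]).map (·.2), some a) := by
        simp [pvAltStep, he]
      rw [List.foldl_cons, hstep,
          ih _ (F ++ P) [(a, b)] a
            (by intro p hp; rcases List.mem_append.1 hp with h | h
                · exact lt_trans (hF p h) hlt
                · exact lt_of_eq_of_lt (hP p h) hlt)
            (by intro p hp; simp at hp; subst hp; rfl)
            hrest' hpw.2]
      have hlist : F ++ P ++ [(a, b)] ++ rest = F ++ P ++ ((a, b) :: rest) := by
        simp
      rw [hlist]
      have hcount : ((F ++ P ++ ((a, b) :: rest)).countP (fun p => pvCnd p (a, b)) : Int)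
          = (((F ++ P).map (·.2)).countP (fun x => b ≤ x) : Int) := by
        rw [List.countP_append,
            countP_cnd_of_lt (F ++ P) a b (by
              intro p hp; rcases List.mem_append.1 hp with h | h
              · exact lt_trans (hF p h) hlt
              · exact lt_of_eq_of_lt (hP p h) hlt),
            countP_cnd_zero ((a, b) :: rest) a b (by
              intro p hp
              rcases List.mem_cons.1 hp with h | h
              · subst h; rfl
              · exact hrest' p h),
            List.countP_map]
        rfl
      simp only [List.map_cons, List.sum_cons, hcount]
      ring

theorem sweep_eq (s : List (Int × Int)) (hpw : s.Pairwise (fun p q => p.1 ≤ q.1)) :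
    (s.foldl pvAltStep (0, [], [], none)).1
      = (s.map (fun q => (s.countP (fun p => pvCnd p q) : Int))).sum := by
  cases s with
  | nil => simp
  | cons q rest =>
    obtain ⟨a, b⟩ := q
    rw [List.pairwise_cons] at hpw
    have hstep : pvAltStep (0, [], [], none) (a, b)
        = (0, ([] : List (Int × Int)).map (·.2), ([(a, b)]).map (·.2), some a) := by
      simp [pvAltStep]
    rw [List.foldl_cons, hstep,
        loop_run rest 0 [] [(a, b)] a (by simp) (by simp)
          (fun q' hq' => hpw.1 q' hq') hpw.2]
    have hzero : (((a, b) :: rest).countP (fun p => pvCnd p (a, b)) : Int) = 0 := by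
      rw [countP_cnd_zero ((a, b) :: rest) a b (by
        intro p hp
        rcases List.mem_cons.1 hp with h | h
        · subst h; rfl
        · exact hpw.1 p h)]
      rfl
    simp only [List.map_cons, List.sum_cons, hzero, List.nil_append, List.singleton_append,
      zero_add]

-- B computes, for each person q of the sorted list, how many p greet it
theorem b_eq_colsum (people : List (Int × Int)) :
    n_greetings_alt people
      = ((PySem.List.sorted people (fun p => p.1) false).map
          (fun q => ((PySem.List.sorted people (fun p => p.1) false).countP (fun p => pvCnd p q) : Int))).sum := by
  exact sweep_eq _ (PySem.List.sorted_pairwise people (fun p => p.1))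

-- ===== VERDICT (by name: the statement is the Claim_ definition above) =====
theorem n_greetings_spec : Claim_equal_n_greetings := by
  intro people _
  show n_greetings people = n_greetings_alt people
  rw [a_eq_rowsum, sum_swap, b_eq_colsum,
      colsum_perm people _ (PySem.List.sorted_perm people (fun p => p.1) false)]
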